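-- pv_equiv track=rewrite | github.com/kidturbo/Flashy | tools/vinwrite_debug.py | result_of
-- ===== SOURCE A (Python) =====
-- def result_of(lines):
--     """Summarise a command's reply: 'ok' | 'err:<msg>' | 'nrc:<hex>' | 'timeout'."""
--     for line in reversed(lines):
--         if line == 'OK':
--             return 'ok'
--         if line.startswith('ERR: NRC 0x'):
--             return 'nrc:' + line.split('0x', 1)[1].strip()
--         if line.startswith('ERR:'):
--             return 'err:' + line[4:].strip()
--         if line == '<read timeout>':
--             return 'timeout'
--     return 'unknown'
-- ===== SOURCE B (Python) =====
-- def result_of(lines):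
--     """Summarise a command's reply: 'ok' | 'err:<msg>' | 'nrc:<hex>' | 'timeout'."""
--     result = 'unknown'
--     for line in lines:
--         if line == 'OK':
--             result = 'ok'
--         elif line.startswith('ERR:'):
--             if line.startswith('ERR: NRC 0x'):
--                 result = 'nrc:' + line[11:].strip()
--             else:
--                 result = 'err:' + line[4:].strip()
--         elif line == '<read timeout>':
--             result = 'timeout'
--     return result
-- ===== Notes on version B (the rewrite author's own statement) =====
-- stated objective: alternative
-- what changed: Replaced A's reversed-iteration early-return loop and flat four-branch chain by a forward single-pass accumulator with nested branching (one outer 'ERR:' prefix test with the NRC case decided inside it) and a direct slice line[11:] for the NRC payload in place of A's split('0x', 1)[1].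
import Mathlib
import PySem

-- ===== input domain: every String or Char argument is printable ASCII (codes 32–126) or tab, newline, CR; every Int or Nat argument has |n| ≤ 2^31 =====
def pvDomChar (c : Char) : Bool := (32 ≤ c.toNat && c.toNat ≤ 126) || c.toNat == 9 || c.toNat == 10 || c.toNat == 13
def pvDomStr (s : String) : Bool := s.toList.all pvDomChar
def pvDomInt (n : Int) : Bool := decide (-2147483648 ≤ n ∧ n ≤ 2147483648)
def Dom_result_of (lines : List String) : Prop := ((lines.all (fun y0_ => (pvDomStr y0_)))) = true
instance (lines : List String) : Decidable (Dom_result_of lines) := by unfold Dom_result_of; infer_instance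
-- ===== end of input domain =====

-- B replaces A's reversed early-return loop and flat branch chain by a forward accumulator with nested ERR branching and a direct line[11:] slice for the NRC payload; same result, alternative decomposition.

-- ===== PORT A =====
-- A's loop over reversed(lines): the first matching line in reverse order decides; four flat branches, split('0x', 1)[1] for NRC.
def pvLoopA : List String → String
  | [] => "unknown"
  | line :: rest =>
    if line = "OK" then "ok"
    else if PySem.Str.startswith line "ERR: NRC 0x" then
      "nrc:" ++ PySem.Str.strip ((PySem.List.pyGet? ((PySem.Str.splitMax? line "0x" 1).getD []) 1).getD "")
    else if PySem.Str.startswith line "ERR:" then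
      "err:" ++ PySem.Str.strip (PySem.Str.slice line (some 4) none)
    else if line = "<read timeout>" then "timeout"
    else pvLoopA rest

def result_of (lines : List String) : String := pvLoopA lines.reverse

-- ===== PORT B =====
-- B's loop body: nested branching (outer 'ERR:' test, NRC case decided inside) and line[11:] for the NRC payload; the forward fold overwrites the accumulator on every match.
def pvStep (r : String) (line : String) : String :=
  if line = "OK" then "ok"
  else if PySem.Str.startswith line "ERR:" then
    if PySem.Str.startswith line "ERR: NRC 0x" then
      "nrc:" ++ PySem.Str.strip (PySem.Str.slice line (some 11) none)
    else
      "err:" ++ PySem.Str.strip (PySem.Str.slice line (some 4) none)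
  else if line = "<read timeout>" then "timeout"
  else r

def result_of_alt (lines : List String) : String := lines.foldl pvStep "unknown"

-- ===== PRECONDITION & SPEC =====
def Spec_result_of (lines : List String) (out : String) : Prop := out = result_of_alt lines
instance (lines : List String) (out : String) : Decidable (Spec_result_of lines out) := by unfold Spec_result_of; infer_instance

-- ===== CLAIM (what is proved, stated in full; the proofs are below) =====
def Claim_equal_result_of : Prop := ∀ (lines : List String), Dom_result_of lines → Spec_result_of lines (result_of lines)

-- ===== LEMMAS AND PROOFS =====

-- split's worker with maxsplit 0 returns the remainder whole, for any fuel
theorem pv_go_m0 (sep : List Char) (f : Nat) (l cur : List Char) (acc : List (List Char)) :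
    PySem.Chars.splitOnMax.go sep f 0 l cur acc = ((cur.reverse ++ l) :: acc).reverse := by
  cases f with
  | zero => simp [PySem.Chars.splitOnMax.go]
  | succ f => cases l <;> simp [PySem.Chars.splitOnMax.go]

-- one non-matching head is consumed
theorem pv_go_nomatch (sep : List Char) (f m : Nat) (hm : m ≠ 0) (c : Char) (rest cur : List Char)
    (acc : List (List Char)) (h : sep.isPrefixOf (c :: rest) = false) :
    PySem.Chars.splitOnMax.go sep (f + 1) m (c :: rest) cur acc =
      PySem.Chars.splitOnMax.go sep f m rest (c :: cur) acc := by
  simp [PySem.Chars.splitOnMax.go, hm, h]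

-- a matching position splits off the piece collected so far
theorem pv_go_match (sep : List Char) (f m : Nat) (hm : m ≠ 0) (c : Char) (rest cur : List Char)
    (acc : List (List Char)) (h : sep.isPrefixOf (c :: rest) = true) :
    PySem.Chars.splitOnMax.go sep (f + 1) m (c :: rest) cur acc =
      PySem.Chars.splitOnMax.go sep f (m - 1) (List.drop sep.length (c :: rest)) [] (cur.reverse :: acc) := by
  simp [PySem.Chars.splitOnMax.go, hm, h]

-- split('0x', 1) on a line carrying the NRC prefix: head piece "ERR: NRC ", tail t
theorem pv_split_nrc (t : List Char) :
    PySem.Chars.splitMax? ('E'::'R'::'R'::':'::' '::'N'::'R'::'C'::' '::'0'::'x'::t) ['0','x'] 1 =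
      some [['E','R','R',':',' ','N','R','C',' '], t] := by
  simp only [PySem.Chars.splitMax?, PySem.Chars.splitOnMax]
  norm_num
  rw [pv_go_nomatch _ _ _ (by omega) _ _ _ _ (by simp [List.isPrefixOf])]
  rw [pv_go_nomatch _ _ _ (by omega) _ _ _ _ (by simp [List.isPrefixOf])]
  rw [pv_go_nomatch _ _ _ (by omega) _ _ _ _ (by simp [List.isPrefixOf])]
  rw [pv_go_nomatch _ _ _ (by omega) _ _ _ _ (by simp [List.isPrefixOf])]
  rw [pv_go_nomatch _ _ _ (by omega) _ _ _ _ (by simp [List.isPrefixOf])]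
  rw [pv_go_nomatch _ _ _ (by omega) _ _ _ _ (by simp [List.isPrefixOf])]
  rw [pv_go_nomatch _ _ _ (by omega) _ _ _ _ (by simp [List.isPrefixOf])]
  rw [pv_go_nomatch _ _ _ (by omega) _ _ _ _ (by simp [List.isPrefixOf])]
  rw [pv_go_nomatch _ _ _ (by omega) _ _ _ _ (by simp [List.isPrefixOf])]
  rw [pv_go_match _ _ _ (by omega) _ _ _ _ (by simp [List.isPrefixOf])]
  rw [pv_go_m0]
  simp

-- the NRC payload: A's split-based expression equals B's slice-based one
theorem pv_nrc_eq (line : String) (h : PySem.Str.startswith line "ERR: NRC 0x" = true) :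
    PySem.Str.strip ((PySem.List.pyGet? ((PySem.Str.splitMax? line "0x" 1).getD []) 1).getD "") =
      PySem.Str.strip (PySem.Str.slice line (some 11) none) := by
  rw [PySem.Str.startswith_eq, PySem.Chars.startswith_iff] at h
  obtain ⟨t, ht⟩ := h
  have ht' : line.toList = 'E'::'R'::'R'::':'::' '::'N'::'R'::'C'::' '::'0'::'x'::t := by
    rw [← ht]; rfl
  simp [PySem.Str.splitMax?, ht', pv_split_nrc, PySem.List.pyGet?, PySem.List.pyIdx?]
  congr 1
  apply String.toList_inj.mp
  rw [PySem.Str.toList_slice, PySem.Chars.slice_eq_listSlice]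
  simp [ht', PySem.List.slice, PySem.List.clampIdx]

-- the NRC prefix implies the ERR prefix
theorem pv_sw_trans (line : String) (h : PySem.Str.startswith line "ERR: NRC 0x" = true) :
    PySem.Str.startswith line "ERR:" = true := by
  rw [PySem.Str.startswith_eq, PySem.Chars.startswith_iff] at h ⊢
  exact List.IsPrefix.trans (by decide) h

-- A's recursive early-return step equals B's accumulator step
theorem pvLoopA_cons (line : String) (rest : List String) :
    pvLoopA (line :: rest) = pvStep (pvLoopA rest) line := by
  simp only [pvLoopA, pvStep]
  split_ifs with h1 h2 h3 h4 h5 h6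
  · rfl
  · exact congrArg _ (pv_nrc_eq line h2)
  · exact absurd (pv_sw_trans line h2) h3
  · exact absurd (pv_sw_trans line h2) h3
  · rfl
  · rfl
  · rfl

-- core: A's loop on the reverse of l equals B's forward fold on l
theorem pvLoop_eq_fold (l : List String) :
    pvLoopA l.reverse = l.foldl pvStep "unknown" := by
  induction l using List.reverseRecOn with
  | nil => rfl
  | append_singleton xs x ih =>
    rw [List.reverse_append, List.reverse_singleton, List.singleton_append, pvLoopA_cons,
      List.foldl_append, ih]
    rfl

-- ===== VERDICT (by name: the statement is the Claim_ definition above) =====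
theorem result_of_spec : Claim_equal_result_of := by
  intro lines _
  unfold Spec_result_of result_of result_of_alt
  exact pvLoop_eq_fold lines
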